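-- pv_equiv track=rewrite | github.com/injaneity/sagasu | scraper_async/scraper.py | split_bookings_by_day
-- ===== SOURCE A (Python) =====
-- def split_bookings_by_day(bookings):
--     """
--     Splits scraped bookings by day
--     """
--     days = []
--     current_day = []
--     for booking in bookings:
--         if '(not available)' in booking:
--             if not current_day:
--                 current_day.append(booking)
--             else:
--                 current_day.append(booking)
--                 days.append(current_day)
--                 current_day = []
--         else:
--             if current_day:
--                 current_day.append(booking)
--     return days
-- ===== SOURCE B (Python) =====
-- def split_bookings_by_day(bookings):
--     """
--     Splits scraped bookings by day
--     """
--     items = list(bookings)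
--     marks = [i for i, b in enumerate(items) if '(not available)' in b]
--     it = iter(marks)
--     return [items[open_:close + 1] for open_, close in zip(it, it)]
-- ===== Notes on version B (the rewrite author's own statement) =====
-- stated objective: alternative
-- what changed: B replaces A's stateful accumulator loop by a single index scan that collects the marker positions, pairs them consecutively, and returns the slices between each open/close marker pair.
import Mathlib
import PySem

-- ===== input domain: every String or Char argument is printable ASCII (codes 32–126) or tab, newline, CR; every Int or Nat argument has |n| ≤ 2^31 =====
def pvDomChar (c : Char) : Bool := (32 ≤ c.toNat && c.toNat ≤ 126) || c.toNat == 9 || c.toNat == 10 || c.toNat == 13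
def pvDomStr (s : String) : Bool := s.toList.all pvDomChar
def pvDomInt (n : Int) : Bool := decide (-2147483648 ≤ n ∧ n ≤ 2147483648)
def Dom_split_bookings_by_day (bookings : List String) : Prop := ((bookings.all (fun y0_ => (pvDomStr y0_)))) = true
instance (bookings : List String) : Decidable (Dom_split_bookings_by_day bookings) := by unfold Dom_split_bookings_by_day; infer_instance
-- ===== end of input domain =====

-- B replaces A's stateful accumulator loop by a marker-index scan paired consecutively into slices (alternative decomposition, same cost).

-- ===== PORT A =====
def split_bookings_by_day (bookings : List String) : List (List String) :=
  (bookings.foldl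
    (fun (st : List (List String) × List String) booking =>
      if PySem.Str.isIn "(not available)" booking then
        if st.2 = [] then (st.1, st.2 ++ [booking])
        else (st.1 ++ [st.2 ++ [booking]], ([] : List String))
      else
        if st.2 = [] then st
        else (st.1, st.2 ++ [booking]))
    (([], []) : List (List String) × List String)).1

-- ===== PORT B =====
-- zip(it, it) on one iterator pairs consecutive elements; ported exactly as this structural recursion.
def pvPairUp : List Int → List (Int × Int)
  | a :: b :: rest => (a, b) :: pvPairUp rest
  | _ => []

def split_bookings_by_day_alt (bookings : List String) : List (List String) :=
  let items := bookings
  let marks := ((PySem.List.enumerate items 0).filter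
      (fun p => PySem.Str.isIn "(not available)" p.2)).map (fun p => p.1)
  (pvPairUp marks).map (fun p => PySem.List.slice items (some p.1) (some (p.2 + 1)))

-- ===== PRECONDITION & SPEC =====
def Spec_split_bookings_by_day (bookings : List String) (out : List (List String)) : Prop := out = split_bookings_by_day_alt bookings
instance (bookings : List String) (out : List (List String)) : Decidable (Spec_split_bookings_by_day bookings out) := by unfold Spec_split_bookings_by_day; infer_instance

-- ===== CLAIM (what is proved, stated in full; the proofs are below) =====
def Claim_equal_split_bookings_by_day : Prop := ∀ (bookings : List String), Dom_split_bookings_by_day bookings → Spec_split_bookings_by_day bookings (split_bookings_by_day bookings)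

-- ===== LEMMAS AND PROOFS =====

/-- The marker test shared by both programs. -/
def pvMark (b : String) : Bool := PySem.Str.isIn "(not available)" b

/-- Common recursive specification: `none` = no day open, `some cur` = day `cur` open. -/
def pvSpecGo : Option (List String) → List String → List (List String)
  | _, [] => []
  | none, b :: rest => if pvMark b then pvSpecGo (some [b]) rest else pvSpecGo none rest
  | some cur, b :: rest =>
      if pvMark b then (cur ++ [b]) :: pvSpecGo none rest
      else pvSpecGo (some (cur ++ [b])) rest

/-- A's loop body. -/
def pvStepA (st : List (List String) × List String) (booking : String) :
    List (List String) × List String :=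
  if PySem.Str.isIn "(not available)" booking then
    if st.2 = [] then (st.1, st.2 ++ [booking])
    else (st.1 ++ [st.2 ++ [booking]], ([] : List String))
  else
    if st.2 = [] then st
    else (st.1, st.2 ++ [booking])

lemma pvFoldA (l : List String) : ∀ (days : List (List String)) (cur : List String),
    (l.foldl pvStepA (days, cur)).1 =
      days ++ pvSpecGo (if cur = [] then none else some cur) l := by
  induction l with
  | nil => intro days cur; split <;> simp [pvSpecGo]
  | cons b rest ih =>
    intro days cur
    by_cases hm : pvMark b
    · have hm' : PySem.Chars.isIn "(not available)".toList b.toList = true := by simpa [pvMark] using hm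
      by_cases hc : cur = []
      · subst hc
        have hstep : pvStepA (days, []) b = (days, [b]) := by simp [pvStepA]; exact hm'
        rw [List.foldl_cons, hstep, ih days [b]]
        simp [pvSpecGo, hm]
      · have hstep : pvStepA (days, cur) b = (days ++ [cur ++ [b]], []) := by
          simp [pvStepA, hc]; exact hm'
        rw [List.foldl_cons, hstep, ih]
        simp [pvSpecGo, hm, hc]
    · have hm' : PySem.Chars.isIn "(not available)".toList b.toList = false := by simpa [pvMark] using hm
      by_cases hc : cur = []
      · subst hc
        have hstep : pvStepA (days, []) b = (days, []) := by simp [pvStepA]; exact hm'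
        rw [List.foldl_cons, hstep, ih days []]
        simp [pvSpecGo, hm]
      · have hstep : pvStepA (days, cur) b = (days, cur ++ [b]) := by simp [pvStepA, hc]; exact hm'
        rw [List.foldl_cons, hstep, ih]
        simp [pvSpecGo, hm, hc]

/-- Marker indices of `l`, starting at index `s`. -/
def pvMarksFrom (s : Int) (l : List String) : List Int :=
  ((PySem.List.enumerate l s).filter (fun p => pvMark p.2)).map (fun p => p.1)

lemma pvMarksFrom_cons (s : Int) (b : String) (l : List String) :
    pvMarksFrom s (b :: l) =
      if pvMark b then s :: pvMarksFrom (s + 1) l else pvMarksFrom (s + 1) l := by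
  simp [pvMarksFrom, PySem.List.enumerate_cons, List.filter_cons]
  by_cases h : pvMark b <;> simp [h]

lemma pvMarksFrom_shift (l : List String) : ∀ s : Int,
    pvMarksFrom s l = (pvMarksFrom 0 l).map (· + s) := by
  induction l with
  | nil => intro s; simp [pvMarksFrom]
  | cons b rest ih =>
    intro s
    rw [pvMarksFrom_cons, pvMarksFrom_cons, zero_add]
    by_cases h : pvMark b
    · rw [if_pos h, if_pos h, ih (s + 1), ih 1, List.map_cons, List.map_map]
      congr 1
      · omega
      · exact List.map_congr_left (fun x _ => by simp only [Function.comp_apply]; omega)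
    · rw [if_neg h, if_neg h, ih (s + 1), ih 1, List.map_map]
      exact List.map_congr_left (fun x _ => by simp only [Function.comp_apply]; omega)

lemma pvMarksFrom_nonneg (l : List String) : ∀ (s x : Int), x ∈ pvMarksFrom s l → s ≤ x := by
  induction l with
  | nil => intro s x h; simp [pvMarksFrom] at h
  | cons b rest ih =>
    intro s x h
    rw [pvMarksFrom_cons] at h
    by_cases hm : pvMark b
    · rw [if_pos hm] at h
      rcases List.mem_cons.mp h with h | h
      · omega
      · have := ih (s + 1) x h; omega
    · rw [if_neg hm] at h
      have := ih (s + 1) x h; omega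

lemma pvMem_pairUp : ∀ (m : List Int) (p : Int × Int), p ∈ pvPairUp m → p.1 ∈ m ∧ p.2 ∈ m
  | [], p, hp => by simp [pvPairUp] at hp
  | [a], p, hp => by simp [pvPairUp] at hp
  | a :: b :: rest, p, hp => by
      rw [pvPairUp] at hp
      rcases List.mem_cons.mp hp with h | h
      · subst h; simp
      · have := pvMem_pairUp rest p h
        exact ⟨List.mem_cons_of_mem _ (List.mem_cons_of_mem _ this.1),
               List.mem_cons_of_mem _ (List.mem_cons_of_mem _ this.2)⟩

lemma pvPairUp_map (f : Int → Int) : ∀ m : List Int,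
    pvPairUp (m.map f) = (pvPairUp m).map (fun p => (f p.1, f p.2))
  | [] => by simp [pvPairUp]
  | [a] => by simp [pvPairUp]
  | a :: b :: rest => by
      rw [show (a :: b :: rest).map f = f a :: f b :: rest.map f from rfl, pvPairUp, pvPairUp,
          pvPairUp_map f rest]
      simp

/-- Slice named by an (open, close) pair. -/
def pvSliceF (l : List String) (p : Int × Int) : List String :=
  PySem.List.slice l (some p.1) (some (p.2 + 1))

lemma pvSliceF_shift (b : String) (rest : List String) (p : Int × Int)
    (h1 : 0 ≤ p.1) (h2 : 0 ≤ p.2) :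
    pvSliceF (b :: rest) (p.1 + 1, p.2 + 1) = pvSliceF rest p := by
  simp only [pvSliceF]
  rw [PySem.List.slice_toNat (b :: rest) (show (0:Int) ≤ p.1 + 1 by omega)
        (show (0:Int) ≤ p.2 + 1 + 1 by omega),
      PySem.List.slice_toNat rest h1 (show (0:Int) ≤ p.2 + 1 by omega)]
  have e1 : (p.1 + 1).toNat = p.1.toNat + 1 := by omega
  rw [e1, List.drop_succ_cons]
  congr 1
  omega

lemma pvMap_slice_shift (b : String) (rest : List String) (m : List Int)
    (hnn : ∀ x ∈ m, 0 ≤ x) :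
    ((pvPairUp (m.map (· + 1))).map (pvSliceF (b :: rest))) =
      (pvPairUp m).map (pvSliceF rest) := by
  rw [pvPairUp_map, List.map_map]
  refine List.map_congr_left ?_
  intro p hp
  have hm := pvMem_pairUp m p hp
  simp only [Function.comp_apply]
  exact pvSliceF_shift b rest p (hnn _ hm.1) (hnn _ hm.2)

lemma pvSlice_take_cons (b : String) (rest : List String) (c : Int) (hc : 0 ≤ c) :
    PySem.List.slice (b :: rest) (some 0) (some (c + 1 + 1)) =
      b :: PySem.List.slice rest (some 0) (some (c + 1)) := by
  rw [PySem.List.slice_toNat (b :: rest) (show (0:Int) ≤ (0:Int) by omega)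
        (show (0:Int) ≤ c + 1 + 1 by omega),
      PySem.List.slice_toNat rest (show (0:Int) ≤ (0:Int) by omega)
        (show (0:Int) ≤ c + 1 by omega)]
  have e : (c + 1 + 1).toNat = (c + 1).toNat + 1 := by omega
  simp [e, List.take_succ_cons]

/-- The groups produced by B when a day `cur` is already open and `m` are the
remaining marker indices. -/
def pvOpenGroups (l : List String) (cur : List String) : List Int → List (List String)
  | [] => []
  | c :: m' => (cur ++ PySem.List.slice l (some 0) (some (c + 1))) ::
      (pvPairUp m').map (pvSliceF l)

lemma pvBmain (l : List String) :
    ((pvPairUp (pvMarksFrom 0 l)).map (pvSliceF l) = pvSpecGo none l) ∧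
    (∀ cur, pvOpenGroups l cur (pvMarksFrom 0 l) = pvSpecGo (some cur) l) := by
  induction l with
  | nil => exact ⟨by simp [pvMarksFrom, pvPairUp, pvSpecGo], fun cur => by
      simp [pvMarksFrom, pvOpenGroups, pvSpecGo]⟩
  | cons b rest ih =>
    obtain ⟨ih1, ih2⟩ := ih
    have hcons : pvMarksFrom 0 (b :: rest) =
        if pvMark b then 0 :: (pvMarksFrom 0 rest).map (· + 1)
        else (pvMarksFrom 0 rest).map (· + 1) := by
      rw [pvMarksFrom_cons, zero_add, pvMarksFrom_shift]
    have hnn : ∀ x ∈ pvMarksFrom 0 rest, 0 ≤ x := fun x hx => pvMarksFrom_nonneg rest 0 x hx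
    by_cases hm : pvMark b
    · rw [if_pos hm] at hcons
      constructor
      · rw [hcons]
        rcases hmr : pvMarksFrom 0 rest with _ | ⟨c, m'⟩
        · simp only [List.map_nil]
          show (pvPairUp [0]).map (pvSliceF (b :: rest)) = pvSpecGo none (b :: rest)
          rw [show pvSpecGo none (b :: rest) = pvSpecGo (some [b]) rest by simp [pvSpecGo, hm],
              ← ih2 [b], hmr]
          simp [pvPairUp, pvOpenGroups]
        · have hc : (0 : Int) ≤ c := hnn c (by rw [hmr]; exact List.mem_cons_self)
          have hn2 : ∀ x ∈ m', (0:Int) ≤ x := fun x hx =>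
            hnn x (by rw [hmr]; exact List.mem_cons_of_mem _ hx)
          show (pvPairUp (0 :: (c + 1) :: m'.map (· + 1))).map (pvSliceF (b :: rest)) =
            pvSpecGo none (b :: rest)
          rw [show pvSpecGo none (b :: rest) = pvSpecGo (some [b]) rest by simp [pvSpecGo, hm],
              ← ih2 [b], hmr]
          rw [pvPairUp]
          simp only [List.map_cons, pvOpenGroups]
          congr 1
          · show pvSliceF (b :: rest) (0, c + 1) = _
            simp only [pvSliceF]
            rw [pvSlice_take_cons b rest c hc]
            simp
          · exact pvMap_slice_shift b rest m' hn2
      · intro cur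
        rw [hcons]
        show pvOpenGroups (b :: rest) cur (0 :: (pvMarksFrom 0 rest).map (· + 1)) = _
        rw [show pvSpecGo (some cur) (b :: rest) = (cur ++ [b]) :: pvSpecGo none rest by
              simp [pvSpecGo, hm]]
        simp only [pvOpenGroups]
        rw [show PySem.List.slice (b :: rest) (some 0) (some ((0:Int) + 1)) = [b] by
              rw [PySem.List.slice_toNat (b :: rest) le_rfl (by omega)]; simp,
            pvMap_slice_shift b rest _ hnn, ih1]
    · rw [if_neg hm] at hcons
      constructor
      · rw [hcons, pvMap_slice_shift b rest _ hnn, ih1]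
        simp [pvSpecGo, hm]
      · intro cur
        rw [hcons,
            show pvSpecGo (some cur) (b :: rest) = pvSpecGo (some (cur ++ [b])) rest by
              simp [pvSpecGo, hm],
            ← ih2 (cur ++ [b])]
        rcases hmr : pvMarksFrom 0 rest with _ | ⟨c, m'⟩
        · simp [pvOpenGroups]
        · have hc : (0 : Int) ≤ c := hnn c (by rw [hmr]; exact List.mem_cons_self)
          have hn2 : ∀ x ∈ m', (0:Int) ≤ x := fun x hx =>
            hnn x (by rw [hmr]; exact List.mem_cons_of_mem _ hx)
          simp only [List.map_cons, pvOpenGroups]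
          congr 1
          · rw [pvSlice_take_cons b rest c hc]
            simp
          · exact pvMap_slice_shift b rest m' hn2

lemma pvA_eq_spec (l : List String) : split_bookings_by_day l = pvSpecGo none l := by
  show (l.foldl pvStepA ([], [])).1 = _
  rw [pvFoldA l [] []]
  simp

lemma pvB_eq_spec (l : List String) : split_bookings_by_day_alt l = pvSpecGo none l := by
  show (pvPairUp (pvMarksFrom 0 l)).map (pvSliceF l) = _
  exact (pvBmain l).1

-- ===== VERDICT (by name: the statement is the Claim_ definition above) =====
theorem split_bookings_by_day_spec : Claim_equal_split_bookings_by_day := by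
  intro bookings _
  show split_bookings_by_day bookings = split_bookings_by_day_alt bookings
  rw [pvA_eq_spec, pvB_eq_spec]
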